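-- pv_equiv track=rewrite | github.com/Tarunvetsa/Card_game | assignment2.py | mam
-- ===== SOURCE A (Python) =====
-- def mam(p):
--     d = {}
--     for i in p:
--         if p[i][1]=='1':
--             d[i] = h['10']
--         else:
--             d[i] = h[p[i][1]]
--     return p[max(d,key=d.get)]
--
-- h = {'2':1,'3':2,'4':3,'5':4,'6':5,'7':6,'8':7,'9':8,'10':9,'J':10,"Q":11,'K':12,'A':13,'1':9}
-- ===== SOURCE B (Python) =====
-- h = {'2':1,'3':2,'4':3,'5':4,'6':5,'7':6,'8':7,'9':8,'10':9,'J':10,"Q":11,'K':12,'A':13,'1':9}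
--
-- def mam(p):
--     best = None
--     best_r = None
--     for cards in p.values():
--         c = cards[1]
--         r = h['10'] if c == '1' else h[c]
--         if best is None or r > best_r:
--             best, best_r = cards, r
--     if best is None:
--         raise ValueError('max() arg is an empty sequence')
--     return best
-- ===== Notes on version B (the rewrite author's own statement) =====
-- stated objective: simpler
-- what changed: B replaces A's rank-dict construction followed by max(d, key=d.get) and a final p[key] lookup with a single running-max pass over the values that keeps the best card list and its rank directly (strict > preserves first-wins ties), building no dictionary and doing no lookups afterwards.
-- outside the precondition, e.g. on mam({}): A raises ValueError, B raises ValueError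
import Mathlib
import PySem

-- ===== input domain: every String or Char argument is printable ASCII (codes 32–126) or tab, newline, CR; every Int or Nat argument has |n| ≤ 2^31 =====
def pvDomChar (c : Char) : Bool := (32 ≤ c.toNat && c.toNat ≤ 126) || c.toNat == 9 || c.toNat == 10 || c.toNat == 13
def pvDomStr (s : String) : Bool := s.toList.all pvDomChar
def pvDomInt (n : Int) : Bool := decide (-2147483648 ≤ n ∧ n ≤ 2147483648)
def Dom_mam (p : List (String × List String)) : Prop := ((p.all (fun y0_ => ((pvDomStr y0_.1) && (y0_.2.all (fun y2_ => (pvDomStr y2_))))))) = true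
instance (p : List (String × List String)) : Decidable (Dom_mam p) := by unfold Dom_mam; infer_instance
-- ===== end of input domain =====

-- B replaces A's rank-dict + max(d, key=d.get) + final p[key] lookup by one running-max pass
-- over the card lists (strict > keeps the first maximum), building no dictionary: simpler.
-- Pre_ excludes the inputs where A raises (empty dict, short card list, unknown rank) and
-- association lists with duplicate keys, which cannot arise from a Python dict argument.


-- ===== PORT A =====
-- the module constant h
def hDict : PySem.Dict String Int :=
  PySem.Dict.ofList [("2",1),("3",2),("4",3),("5",4),("6",5),("7",6),("8",7),("9",8),
                     ("10",9),("J",10),("Q",11),("K",12),("A",13),("1",9)]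

-- A: build d[i] = rank of p[i], return p[max(d, key=d.get)].  `none` cases of the
-- PySem primitives are where the Python raises; those inputs are excluded by Pre_mam.
def mam (p : List (String × List String)) : List String :=
  let P : PySem.Dict String (List String) := PySem.Dict.mk p
  let d : PySem.Dict String Int :=
    p.foldl (fun d kv =>
      match (P.get? kv.1).bind (fun v => PySem.List.pyGet? v 1) with
      | none => d          -- IndexError / KeyError: outside Pre_mam
      | some c =>
        if c == "1" then
          match hDict.get? "10" with
          | none => d
          | some r => d.insert kv.1 r
        else
          match hDict.get? c with
          | none => d      -- KeyError: outside Pre_mam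
          | some r => d.insert kv.1 r) PySem.Dict.empty
  match PySem.List.max? d.keys (fun k => d.getD k 0) with
  | none => []             -- ValueError on empty dict: outside Pre_mam
  | some m => (P.get? m).getD []

-- ===== PORT B =====
-- B: one running-max pass keeping (best card list, best rank); strict < keeps the first maximum.
def mam_alt (p : List (String × List String)) : List String :=
  let best :=
    p.foldl (fun (acc : Option (List String × Int)) kv =>
      let c := PySem.List.pyGetD kv.2 1 ""
      let r := hDict.getD (if c == "1" then "10" else c) 0
      match acc with
      | none => some (kv.2, r)
      | some b => if b.2 < r then some (kv.2, r) else some b) none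
  match best with
  | none => []             -- ValueError in Python B: outside Pre_mam
  | some b => b.1

-- ===== PRECONDITION & SPEC =====
-- Pre_ excludes: [] (ValueError), a card list shorter than 2 (IndexError), a rank not in h
-- (KeyError), and duplicate keys, which a Python dict argument cannot have.
def Pre_mam (p : List (String × List String)) : Prop :=
  p ≠ [] ∧ (p.map Prod.fst).Nodup ∧
  ∀ kv ∈ p, 2 ≤ kv.2.length ∧
    PySem.List.pyGetD kv.2 1 "" ∈ ["2","3","4","5","6","7","8","9","10","J","Q","K","A","1"]
instance (p : List (String × List String)) : Decidable (Pre_mam p) := by unfold Pre_mam; infer_instance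

def pvWitness_mam : (List (String × List String)) := [("p1", ["x","K"]), ("p2", ["y","A"])]

def Spec_mam (p : List (String × List String)) (out : List String) : Prop := out = mam_alt p
instance (p : List (String × List String)) (out : List String) : Decidable (Spec_mam p out) := by unfold Spec_mam; infer_instance

-- ===== CLAIM (what is proved, stated in full; the proofs are below) =====
def Claim_equal_mam : Prop := ∀ (p : List (String × List String)), Dom_mam p → Pre_mam p → Spec_mam p (mam p)

-- ===== LEMMAS AND PROOFS =====

-- the rank B computes for one entry
def rkOf (c : String) : Int := hDict.getD (if c == "1" then "10" else c) 0
def rk (kv : String × List String) : Int := rkOf (PySem.List.pyGetD kv.2 1 "")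

-- the common running maximum (first maximum wins)
def runMax (m : String × List String) (l : List (String × List String)) : String × List String :=
  l.foldl (fun mm kv => if rk mm < rk kv then kv else mm) m

lemma runMax_mem (l : List (String × List String)) (m : String × List String) :
    runMax m l ∈ m :: l := by
  induction l generalizing m with
  | nil => simp [runMax]
  | cons kv t ih =>
    show runMax (if rk m < rk kv then kv else m) t ∈ m :: kv :: t
    rcases List.mem_cons.mp (ih (if rk m < rk kv then kv else m)) with h | h
    · rw [h]; split
      · exact List.mem_cons_of_mem _ (List.mem_cons_self)
      · exact List.mem_cons_self
    · exact List.mem_cons_of_mem _ (List.mem_cons_of_mem _ h)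

lemma pyGet?_one_of_two_le {l : List String} (h : 2 ≤ l.length) :
    PySem.List.pyGet? l 1 = some (PySem.List.pyGetD l 1 "") := by
  match l, h with
  | a :: b :: t, _ =>
    simp [PySem.List.pyGetD, PySem.List.pyGet?, PySem.List.pyIdx?]

lemma step_of_mem (c : String)
    (hmem : c ∈ ["2","3","4","5","6","7","8","9","10","J","Q","K","A","1"])
    (d : PySem.Dict String Int) (k : String) :
    (if c == "1" then
      match hDict.get? "10" with
      | none => d
      | some r => d.insert k r
     else
      match hDict.get? c with
      | none => d
      | some r => d.insert k r) = d.insert k (rkOf c) := by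
  fin_cases hmem <;> rfl

lemma max?_cons_cons {α : Type} (x y : α) (rest : List α) (g : α → Int) :
    PySem.List.max? (x :: y :: rest) g
      = PySem.List.max? ((if g x < g y then y else x) :: rest) g := by
  unfold PySem.List.max?
  simp only [List.foldl_cons]
  by_cases hxy : g x < g y <;> simp [hxy]

lemma corrA (g : String → Int) (l : List (String × List String))
    (H : ∀ kv ∈ l, g kv.1 = rk kv) (m : String × List String) (hm : g m.1 = rk m) :
    PySem.List.max? (m.1 :: l.map Prod.fst) g = some (runMax m l).1 := by
  induction l generalizing m with
  | nil => rfl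
  | cons kv t ih =>
    rw [List.map_cons, max?_cons_cons]
    have h1 : (if g m.1 < g kv.1 then kv.1 else m.1) = (if rk m < rk kv then kv else m).1 := by
      rw [hm, H kv (by simp)]
      exact (apply_ite Prod.fst _ kv m).symm
    rw [h1]
    show PySem.List.max? ((if rk m < rk kv then kv else m).1 :: t.map Prod.fst) g
      = some (runMax (if rk m < rk kv then kv else m) t).1
    exact ih (fun x hx => H x (by simp [hx])) (if rk m < rk kv then kv else m)
      (by split
          · exact H kv (by simp)
          · exact hm)

lemma corrB (l : List (String × List String)) (m : String × List String) :
    l.foldl (fun (acc : Option (List String × Int)) kv =>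
        match acc with
        | none => some (kv.2, rk kv)
        | some b => if b.2 < rk kv then some (kv.2, rk kv) else some b)
      (some (m.2, rk m))
      = some ((runMax m l).2, rk (runMax m l)) := by
  induction l generalizing m with
  | nil => simp [runMax]
  | cons kv t ih =>
    simp only [List.foldl_cons, runMax]
    by_cases hlt : rk m < rk kv
    · simp only [if_pos hlt]
      exact ih kv
    · simp only [if_neg hlt]
      exact ih m

-- ===== VERDICT (by name: the statement is the Claim_ definition above) =====
theorem mam_spec : Claim_equal_mam := by
  intro p _ hPre
  obtain ⟨hne, hnd, hval⟩ := hPre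
  unfold Spec_mam mam mam_alt
  show (match PySem.List.max?
      (List.foldl (fun d kv =>
        match ((PySem.Dict.mk p).get? kv.1).bind (fun v => PySem.List.pyGet? v 1) with
        | none => d
        | some c =>
          if c == "1" then
            match hDict.get? "10" with
            | none => d
            | some r => d.insert kv.1 r
          else
            match hDict.get? c with
            | none => d
            | some r => d.insert kv.1 r) PySem.Dict.empty p).keys
      (fun k => (List.foldl (fun d kv =>
        match ((PySem.Dict.mk p).get? kv.1).bind (fun v => PySem.List.pyGet? v 1) with
        | none => d
        | some c =>
          if c == "1" then
            match hDict.get? "10" with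
            | none => d
            | some r => d.insert kv.1 r
          else
            match hDict.get? c with
            | none => d
            | some r => d.insert kv.1 r) PySem.Dict.empty p).getD k 0) with
    | none => []
    | some m => ((PySem.Dict.mk p).get? m).getD []) =
    (match List.foldl (fun (acc : Option (List String × Int)) kv =>
        match acc with
        | none => some (kv.2, rk kv)
        | some b => if b.2 < rk kv then some (kv.2, rk kv) else some b) none p with
     | none => []
     | some b => b.1)
  -- lookups in the dict built from p hit the matching pair
  have hLook : ∀ kv ∈ p, (PySem.Dict.mk p).get? kv.1 = some kv.2 := by
    intro kv hkv
    exact PySem.Dict.get?_of_mem_items (d := PySem.Dict.mk p) hkv hnd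
  -- A's loop body inserts exactly rank rk kv
  have hstep : ∀ (d : PySem.Dict String Int), ∀ kv ∈ p,
      (match ((PySem.Dict.mk p).get? kv.1).bind (fun v => PySem.List.pyGet? v 1) with
       | none => d
       | some c =>
         if c == "1" then
           match hDict.get? "10" with
           | none => d
           | some r => d.insert kv.1 r
         else
           match hDict.get? c with
           | none => d
           | some r => d.insert kv.1 r) = d.insert kv.1 (rk kv) := by
    intro d kv hkv
    rw [hLook kv hkv, Option.bind_some, pyGet?_one_of_two_le (hval kv hkv).1]
    exact step_of_mem _ (hval kv hkv).2 d kv.1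
  have hd : (p.foldl (fun d kv =>
      match ((PySem.Dict.mk p).get? kv.1).bind (fun v => PySem.List.pyGet? v 1) with
      | none => d
      | some c =>
        if c == "1" then
          match hDict.get? "10" with
          | none => d
          | some r => d.insert kv.1 r
        else
          match hDict.get? c with
          | none => d
          | some r => d.insert kv.1 r) PySem.Dict.empty)
      = p.foldl (fun d kv => d.insert kv.1 (rk kv)) PySem.Dict.empty := by
    apply PySem.List.foldl_congr_mem
    exact fun d kv hkv => hstep d kv hkv
  rw [hd]
  have hitems : (p.foldl (fun d kv => d.insert kv.1 (rk kv)) PySem.Dict.empty).items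
      = p.map (fun kv => (kv.1, rk kv)) := by
    have := PySem.Dict.items_foldl_insert_fresh (l := p) (k := Prod.fst) (v := rk)
      (d := PySem.Dict.empty) (by intro a _; exact PySem.Dict.contains_empty _) hnd
    simpa using this
  set D := p.foldl (fun d kv => d.insert kv.1 (rk kv)) PySem.Dict.empty with hD
  have hkeys : D.keys = p.map Prod.fst := by
    show D.items.map Prod.fst = _
    rw [hitems, List.map_map]
    rfl
  have hDnd : D.keys.Nodup := by rw [hkeys]; exact hnd
  have hg : ∀ kv ∈ p, D.getD kv.1 0 = rk kv := by
    intro kv hkv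
    exact PySem.Dict.getD_of_mem_items (d := D)
      (by rw [hitems]; exact List.mem_map_of_mem hkv) hDnd 0
  -- destructure p
  obtain ⟨kv0, t, rfl⟩ : ∃ kv0 t, p = kv0 :: t := by
    cases p with
    | nil => exact absurd rfl hne
    | cons a l => exact ⟨a, l, rfl⟩
  -- the max over keys
  rw [hkeys]
  rw [List.map_cons]
  rw [corrA (fun k => D.getD k 0) t (fun kv hkv => hg kv (by simp [hkv])) kv0
      (hg kv0 (by simp))]
  -- the B-side fold: peel the first iteration (definitional) and apply corrB
  show ((PySem.Dict.mk (kv0 :: t)).get? (runMax kv0 t).1).getD []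
    = (match List.foldl (fun (acc : Option (List String × Int)) kv =>
        match acc with
        | none => some (kv.2, rk kv)
        | some b => if b.2 < rk kv then some (kv.2, rk kv) else some b)
        (some (kv0.2, rk kv0)) t with
       | none => []
       | some b => b.1)
  rw [corrB t kv0]
  -- final lookup p[max key]
  rw [hLook (runMax kv0 t) (runMax_mem t kv0)]
  rfl
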